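-- pv_equiv track=rewrite | github.com/ghaniavi/Bagging | Bagging.py | count_class
-- ===== SOURCE A (Python) =====
-- def count_class(a):
--     matrix = [[a[j][i] for j in range(len(a))] for i in range(len(a[0]))]
--     hasil = []
--     for data in matrix:
--         kelas_1 = data.count(1)
--         kelas_2 = data.count(2)
--         if kelas_1 > kelas_2:
--             kelas_hasil = "1"
--         else:
--             kelas_hasil = "2"
--         hasil.append(kelas_hasil)
--     return hasil
-- ===== SOURCE B (Python) =====
-- def count_class(a):
--     cols = len(a[0])
--     diff = [0] * cols
--     for row in a:
--         diff = [d + (1 if v == 1 else -1 if v == 2 else 0)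
--                 for d, v in zip(diff, row)]
--     return ["1" if d > 0 else "2" for d in diff]
-- ===== Notes on version B (the rewrite author's own statement) =====
-- stated objective: simpler
-- what changed: Instead of materialising the transpose and counting 1s and 2s per column, B keeps one running diff[c] = (#1s - #2s) per column, updated in a single pass over the rows via zip, and emits '1' where the diff is positive.
import Mathlib
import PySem

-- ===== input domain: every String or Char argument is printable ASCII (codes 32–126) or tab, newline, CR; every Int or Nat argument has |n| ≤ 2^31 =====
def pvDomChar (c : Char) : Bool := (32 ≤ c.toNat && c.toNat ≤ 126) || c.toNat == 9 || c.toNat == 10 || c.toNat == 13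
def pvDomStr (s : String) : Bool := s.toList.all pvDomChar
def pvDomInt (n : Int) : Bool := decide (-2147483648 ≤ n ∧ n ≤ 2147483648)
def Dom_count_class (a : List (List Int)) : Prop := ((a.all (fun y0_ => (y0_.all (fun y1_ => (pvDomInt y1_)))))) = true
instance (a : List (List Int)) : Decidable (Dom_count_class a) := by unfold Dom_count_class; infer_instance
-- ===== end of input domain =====

-- B replaces A's explicit transpose + per-column counting by a single pass over the rows
-- maintaining one running (#1s - #2s) difference per column; objective: simpler.

-- ===== PORT A =====
def count_class (a : List (List Int)) : List String :=
  let matrix : List (List Int) :=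
    (PySem.List.pyRange 0 ((PySem.List.pyGetD a 0 []).length) 1).map (fun i =>
      (PySem.List.pyRange 0 a.length 1).map (fun j =>
        PySem.List.pyGetD (PySem.List.pyGetD a j []) i 0))
  matrix.foldl (fun hasil data =>
    let kelas_1 := PySem.List.count data 1
    let kelas_2 := PySem.List.count data 2
    let kelas_hasil := if kelas_1 > kelas_2 then "1" else "2"
    hasil ++ [kelas_hasil]) []

-- ===== PORT B =====
def count_class_alt (a : List (List Int)) : List String :=
  let cols := (a.headD []).length
  let diff : List Int := a.foldl
    (fun d row => (d.zip row).map (fun p =>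
      p.1 + (if p.2 = 1 then 1 else if p.2 = 2 then -1 else 0)))
    (List.replicate cols 0)
  diff.map (fun d => if d > 0 then "1" else "2")

-- ===== PRECONDITION & SPEC =====
-- Pre_ excludes exactly the inputs on which Python A raises IndexError: the empty list
-- (a[0] fails) and ragged inputs where some row is shorter than the first row.
def Pre_count_class (a : List (List Int)) : Prop :=
  a ≠ [] ∧ ∀ r ∈ a, (a.headD []).length ≤ r.length
instance (a : List (List Int)) : Decidable (Pre_count_class a) := by
  unfold Pre_count_class; infer_instance
def pvWitness_count_class : List (List Int) := [[1, 2, 3], [2, 2, 1], [1, 1, 2]]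

def Spec_count_class (a : List (List Int)) (out : List String) : Prop := out = count_class_alt a
instance (a : List (List Int)) (out : List String) : Decidable (Spec_count_class a out) := by
  unfold Spec_count_class; infer_instance

-- ===== CLAIM (what is proved, stated in full; the proofs are below) =====
def Claim_equal_count_class : Prop :=
  ∀ (a : List (List Int)), Dom_count_class a → Pre_count_class a →
    Spec_count_class a (count_class a)
-- ===== LEMMAS AND PROOFS =====

-- per-column vote, the common shape both sides are reduced to
def pvVote (a : List (List Int)) (c : Nat) : String :=
  if a.countP (fun r => r.getD c 0 == 1) > a.countP (fun r => r.getD c 0 == 2)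
  then "1" else "2"

theorem count_class_eq_votes (a : List (List Int)) :
    count_class a =
      (List.range (PySem.List.pyGetD a 0 []).length).map (fun c => pvVote a c) := by
  unfold count_class
  rw [PySem.List.foldl_append_singleton_eq_map]
  simp only [PySem.List.pyRange_zero_nat, List.map_map, List.nil_append]
  refine List.map_congr_left (fun c _ => ?_)
  have hcol : (List.range a.length).map
      ((fun j => PySem.List.pyGetD (PySem.List.pyGetD a j []) ((c : Int)) 0) ∘ (fun k : Nat => (k : Int)))
      = a.map (fun r => r.getD c 0) := by
    refine List.ext_getElem (by simp) (fun j hj1 hj2 => ?_)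
    simp only [List.getElem_map, List.getElem_range, Function.comp,
      PySem.List.pyGetD_natCast]
    rw [List.getD_eq_getElem a _ (by simpa using hj2)]
  simp only [Function.comp, pvVote, PySem.List.count_eq, List.count_eq_countP]
  simp only [hcol]
  simp [List.countP_map, Function.comp_def]

-- B's fold invariant: the running diff list is pointwise (#1s - #2s) so far
theorem pvDiffFold (l : List (List Int)) (cols : Nat) (d : List Int)
    (hd : d.length = cols) (hl : ∀ r ∈ l, cols ≤ r.length) :
    l.foldl (fun d row => (d.zip row).map (fun p =>
        p.1 + (if p.2 = 1 then 1 else if p.2 = 2 then -1 else 0))) d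
      = (List.range cols).map (fun c =>
          d.getD c 0 + (l.countP (fun r => r.getD c 0 == 1) : Int)
            - (l.countP (fun r => r.getD c 0 == 2) : Int)) := by
  induction l generalizing d with
  | nil =>
      simp only [List.foldl_nil, List.countP_nil]
      refine List.ext_getElem (by simp [hd]) (fun c h1 h2 => ?_)
      simp [List.getElem?_eq_getElem h1]
  | cons row t ih =>
      have hrow : cols ≤ row.length := hl row (by simp)
      have hd' : ((d.zip row).map (fun p =>
          p.1 + (if p.2 = 1 then 1 else if p.2 = 2 then -1 else 0))).length = cols := by
        simp [hd]; omega
      rw [List.foldl_cons, ih _ hd' (fun r hr => hl r (by simp [hr]))]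
      refine List.map_congr_left (fun c hc => ?_)
      have hc' : c < cols := List.mem_range.mp hc
      have hcd : c < d.length := by omega
      have hcr : c < row.length := by omega
      have hget : ((d.zip row).map (fun p =>
          p.1 + (if p.2 = 1 then 1 else if p.2 = 2 then -1 else 0))).getD c 0
          = d[c] + (if row[c] = 1 then 1 else if row[c] = 2 then -1 else 0) := by
        rw [List.getD_eq_getElem _ _ (by omega)]
        simp [List.getElem_zip]
      have hrc : row.getD c 0 = row[c] := List.getD_eq_getElem row _ hcr
      rw [hget, List.getD_eq_getElem d _ hcd]
      simp only [List.countP_cons, hrc]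
      by_cases h1 : row[c] = 1
      · simp only [h1]; norm_num
        omega
      · by_cases h2 : row[c] = 2
        · simp only [h2]; norm_num
          omega
        · simp only [h1, h2]; norm_num [h1, h2]

theorem count_class_alt_eq_votes (a : List (List Int)) (_hne : a ≠ [])
    (hl : ∀ r ∈ a, (a.headD []).length ≤ r.length) :
    count_class_alt a = (List.range (a.headD []).length).map (fun c => pvVote a c) := by
  simp only [count_class_alt]
  rw [pvDiffFold a (a.headD []).length (List.replicate (a.headD []).length 0)
    (by simp) hl]
  rw [List.map_map]
  refine List.map_congr_left (fun c hc => ?_)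
  have hb : (List.replicate (a.headD []).length (0 : Int)).getD c 0 = 0 := by
    rw [List.getD_eq_getElem _ _ (by simpa using List.mem_range.mp hc)]
    simp
  simp only [Function.comp, hb, pvVote]
  split_ifs with h h' <;> first | rfl | omega

-- ===== VERDICT (by name: the statement is the Claim_ definition above) =====
theorem count_class_spec : Claim_equal_count_class := by
  intro a _ hpre
  obtain ⟨hne, hl⟩ := hpre
  unfold Spec_count_class
  rw [count_class_eq_votes, count_class_alt_eq_votes a hne hl]
  have : PySem.List.pyGetD a 0 [] = a.headD [] := by
    cases a with
    | nil => exact absurd rfl hne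
    | cons x xs => simp [PySem.List.pyGetD]
  rw [this]
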